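-- pv_equiv track=rewrite | github.com/Angeluz-07/personal-backup-of-code | python/Programming Fundamentals Course/proyecto i/Proyecto_MENA_BAUER.py | determinarGanancia
-- ===== SOURCE A (Python) =====
-- def determinarGanancia(premio,l,apuesta,n,veces):
-- 	count=0
-- 	ganancia=0
-- 	for elem in l:
-- 		if elem==premio:
-- 			count+=1
-- 			if count==veces:
-- 				ganancia+=apuesta*n
-- 				for i in range(veces):
-- 					l.remove(premio)
-- 				break
-- 	return ganancia
-- ===== SOURCE B (Python) =====
-- def determinarGanancia(premio, l, apuesta, n, veces):
--     if veces < 1: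
--         return 0
--     kept = []
--     skipped = 0
--     for elem in l:
--         if skipped < veces and elem == premio:
--             skipped += 1
--         else:
--             kept.append(elem)
--     if skipped == veces:
--         l[:] = kept
--         return apuesta * n
--     return 0
-- ===== Notes on version B (the rewrite author's own statement) =====
-- stated objective: alternative
-- what changed: B makes a single rebuilding pass that skips up to veces matches into a new list and awards iff exactly veces were skipped, replacing A's incremental counting with early break plus veces repeated list.remove scans.
import Mathlib
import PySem

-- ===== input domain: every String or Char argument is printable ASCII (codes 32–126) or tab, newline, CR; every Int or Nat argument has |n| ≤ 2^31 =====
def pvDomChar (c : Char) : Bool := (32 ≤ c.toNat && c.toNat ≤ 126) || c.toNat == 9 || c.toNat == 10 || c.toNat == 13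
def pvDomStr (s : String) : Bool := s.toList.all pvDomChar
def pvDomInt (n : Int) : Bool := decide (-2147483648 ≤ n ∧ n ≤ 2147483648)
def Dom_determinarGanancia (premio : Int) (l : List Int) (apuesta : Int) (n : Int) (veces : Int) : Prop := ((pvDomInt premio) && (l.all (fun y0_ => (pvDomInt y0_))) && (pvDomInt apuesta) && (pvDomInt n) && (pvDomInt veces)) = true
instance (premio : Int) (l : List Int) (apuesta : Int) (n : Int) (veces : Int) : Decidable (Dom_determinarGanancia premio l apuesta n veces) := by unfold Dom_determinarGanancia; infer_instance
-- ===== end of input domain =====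

-- ===== PORT A =====
-- B replaces A's incremental count-with-early-break plus repeated list.remove by one
-- rebuilding pass that skips up to `veces` matches ("alternative"). Both A and B mutate
-- `l` identically (removing the first `veces` matches when awarding); the theorems here
-- concern the RETURN value.
def detGanLoop (premio : Int) (apuesta : Int) (n : Int) (veces : Int) : List Int → Int → Int
  | [], _ => 0
  | x :: xs, count =>
    if x = premio then
      if count + 1 = veces then apuesta * n
      else detGanLoop premio apuesta n veces xs (count + 1)
    else detGanLoop premio apuesta n veces xs count

def determinarGanancia (premio : Int) (l : List Int) (apuesta : Int) (n : Int) (veces : Int) : Int :=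
  detGanLoop premio apuesta n veces l 0

-- ===== PORT B =====
-- state = (kept list so far, number of matches skipped so far), as in Source B's loop
def altLoop (premio : Int) (veces : Int) : List Int → List Int × Int → List Int × Int
  | [], st => st
  | x :: xs, (kept, skipped) =>
    if skipped < veces ∧ x = premio then altLoop premio veces xs (kept, skipped + 1)
    else altLoop premio veces xs (kept ++ [x], skipped)

def determinarGanancia_alt (premio : Int) (l : List Int) (apuesta : Int) (n : Int) (veces : Int) : Int :=
  if veces < 1 then 0
  else if (altLoop premio veces l ([], 0)).2 = veces then apuesta * n else 0

-- ===== PRECONDITION & SPEC =====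
def Spec_determinarGanancia (premio : Int) (l : List Int) (apuesta : Int) (n : Int) (veces : Int) (out : Int) : Prop := out = determinarGanancia_alt premio l apuesta n veces
instance (premio : Int) (l : List Int) (apuesta : Int) (n : Int) (veces : Int) (out : Int) : Decidable (Spec_determinarGanancia premio l apuesta n veces out) := by unfold Spec_determinarGanancia; infer_instance

-- ===== CLAIM (what is proved, stated in full; the proofs are below) =====
def Claim_equal_determinarGanancia : Prop := ∀ (premio : Int) (l : List Int) (apuesta : Int) (n : Int) (veces : Int), Dom_determinarGanancia premio l apuesta n veces → Spec_determinarGanancia premio l apuesta n veces (determinarGanancia premio l apuesta n veces)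

-- ===== LEMMAS AND PROOFS =====
-- A's loop returns apuesta*n iff there are at least `veces` matches (with veces ≥ count+1 kept as invariant).
theorem detGanLoop_eq (premio apuesta n veces : Int) (xs : List Int) (count : Int)
    (h0 : 0 ≤ count) (h1 : count + 1 ≤ veces ∨ veces < 1) :
    detGanLoop premio apuesta n veces xs count =
      if 1 ≤ veces ∧ veces ≤ count + (List.count premio xs : Int) then apuesta * n else 0 := by
  induction xs generalizing count with
  | nil => simp [detGanLoop]; omega
  | cons x xs ih =>
    have hcnt : (0:Int) ≤ (List.count premio xs : Int) := Int.natCast_nonneg _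
    by_cases hx : x = premio
    · subst hx
      by_cases hc : count + 1 = veces
      · rw [detGanLoop, if_pos rfl, if_pos hc, if_pos]
        simp only [List.count_cons_self]
        push_cast
        constructor <;> omega
      · rw [detGanLoop, if_pos rfl, if_neg hc, ih _ (by omega) (by omega)]
        simp only [List.count_cons_self]
        congr 1
        simp only [eq_iff_iff]
        push_cast
        constructor <;> rintro ⟨u, v⟩ <;> exact ⟨u, by omega⟩
    · rw [detGanLoop, if_neg hx, ih _ h0 h1]
      simp [hx]

-- B's skipped counter ends at min veces (skipped + count).
theorem altLoop_snd (premio veces : Int) (xs : List Int) (kept : List Int) (skipped : Int)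
    (hs : skipped ≤ veces) :
    (altLoop premio veces xs (kept, skipped)).2 =
      min veces (skipped + (List.count premio xs : Int)) := by
  induction xs generalizing kept skipped with
  | nil => simp [altLoop]; omega
  | cons x xs ih =>
    have hcnt : (0:Int) ≤ (List.count premio xs : Int) := Int.natCast_nonneg _
    by_cases hx : x = premio
    · subst hx
      by_cases hlt : skipped < veces
      · rw [altLoop, if_pos ⟨hlt, rfl⟩, ih _ _ (by omega)]
        simp only [List.count_cons_self]
        push_cast
        omega
      · rw [altLoop, if_neg (by tauto), ih _ _ hs]
        simp only [List.count_cons_self]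
        push_cast
        omega
    · rw [altLoop, if_neg (by tauto), ih _ _ hs]
      simp [hx]

-- ===== VERDICT (by name: the statement is the Claim_ definition above) =====
theorem determinarGanancia_spec : Claim_equal_determinarGanancia := by
  intro premio l apuesta n veces _
  unfold Spec_determinarGanancia determinarGanancia determinarGanancia_alt
  have hcnt : (0:Int) ≤ (List.count premio l : Int) := Int.natCast_nonneg _
  rw [detGanLoop_eq premio apuesta n veces l 0 (by omega) (by omega)]
  by_cases hv : veces < 1
  · rw [if_pos hv, if_neg (by omega)]
  · rw [if_neg hv, altLoop_snd premio veces l [] 0 (by omega)]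
    simp only [zero_add]
    by_cases h : veces ≤ (List.count premio l : Int)
    · rw [if_pos ⟨by omega, by omega⟩, if_pos (by omega)]
    · rw [if_neg (by omega), if_neg (by omega)]
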